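-- pv_equiv track=rewrite | github.com/mariospar/instant_runnoff_voting | irv.py | find_least_prominent
-- ===== SOURCE A (Python) =====
-- from typing import Dict, Text, Tuple, List, Optional
--
-- def find_least_prominent(stats: Dict[Text, int]) -> List[Text]:
--     """
--     Find the least prominent feature in the dataset
--
--     :param stats: A dictionary of the form {word: frequency}
--     :type stats: Dict[Text, int]
--     :return: The least prominent words in the text.
--     """
--
--     removed_zeros = stats
--     for k, v in stats.copy().items():
--         if v == 0:
--             stats.pop(k)
--
--     return [
--         k
--         for k, v in removed_zeros.items()
--         if v == min(removed_zeros.items(), key=lambda x: x[1])[1]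
--     ]
-- ===== SOURCE B (Python) =====
-- def find_least_prominent(stats):
--     # Same observable in-place mutation as A: drop zero-frequency keys.
--     for k, v in list(stats.items()):
--         if v == 0:
--             stats.pop(k)
--     # One pass: inverted index value -> keys (insertion order), then one min.
--     buckets = {}
--     for k, v in stats.items():
--         buckets.setdefault(v, []).append(k)
--     if not buckets:
--         return []
--     return buckets[min(buckets)]
-- ===== Notes on version B (the rewrite author's own statement) =====
-- stated objective: faster
-- what changed: A re-evaluates min(items) inside the list comprehension for every key (quadratic); B builds an inverted index value->keys in one pass and returns the bucket of the single min computed once.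
import Mathlib
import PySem

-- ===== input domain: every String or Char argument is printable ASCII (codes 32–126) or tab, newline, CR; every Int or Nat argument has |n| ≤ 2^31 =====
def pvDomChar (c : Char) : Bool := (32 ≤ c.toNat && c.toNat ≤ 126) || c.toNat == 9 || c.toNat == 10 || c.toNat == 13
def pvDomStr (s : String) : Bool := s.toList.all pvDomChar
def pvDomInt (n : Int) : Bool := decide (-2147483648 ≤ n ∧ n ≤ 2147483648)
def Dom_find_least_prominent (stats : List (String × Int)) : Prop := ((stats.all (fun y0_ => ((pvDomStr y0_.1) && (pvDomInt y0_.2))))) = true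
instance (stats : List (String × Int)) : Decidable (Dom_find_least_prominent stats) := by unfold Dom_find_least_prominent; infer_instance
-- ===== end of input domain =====

-- B replaces A's per-element re-evaluation of min(items) by a one-pass inverted index (value -> keys) and a single min — faster; A also mutates its dict argument in place (zero-valued keys popped) and B performs the same mutation; the equivalence proved is about the return value.


-- ===== PORT A =====
-- the dict argument, read as Python's dict(stats): last value wins, first position kept
def find_least_prominent (stats : List (String × Int)) : List String :=
  let d : PySem.Dict String Int := PySem.Dict.ofList stats
  -- for k, v in stats.copy().items(): if v == 0: stats.pop(k)
  let removed_zeros : PySem.Dict String Int :=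
    d.items.foldl (fun (acc : PySem.Dict String Int) kv =>
      if kv.2 = 0 then acc.erase kv.1 else acc) d
  -- [k for k, v in removed_zeros.items() if v == min(removed_zeros.items(), key=lambda x: x[1])[1]]
  -- (min is evaluated inside the loop body, so it is never reached on an empty dict)
  removed_zeros.items.foldl (fun (out : List String) kv =>
      if (PySem.List.min? removed_zeros.items (fun x => x.2)).map (fun p => p.2) = some kv.2
      then out ++ [kv.1] else out) []

-- ===== PORT B =====
def find_least_prominent_alt (stats : List (String × Int)) : List String :=
  let d : PySem.Dict String Int := PySem.Dict.ofList stats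
  -- for k, v in list(stats.items()): if v == 0: stats.pop(k)
  let d2 : PySem.Dict String Int :=
    d.items.foldl (fun (acc : PySem.Dict String Int) kv =>
      if kv.2 = 0 then acc.erase kv.1 else acc) d
  -- buckets = {}; for k, v in stats.items(): buckets.setdefault(v, []).append(k)
  let buckets : PySem.Dict Int (List String) :=
    d2.items.foldl (fun (b : PySem.Dict Int (List String)) kv =>
      b.modify kv.2 [] (fun ks => ks ++ [kv.1])) PySem.Dict.empty
  -- if not buckets: return [];  return buckets[min(buckets)]
  match PySem.List.min? buckets.keys (fun x => x) with
  | none => []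
  | some least => buckets.getD least []

-- ===== PRECONDITION & SPEC =====
def Spec_find_least_prominent (stats : List (String × Int)) (out : List String) : Prop := out = find_least_prominent_alt stats
instance (stats : List (String × Int)) (out : List String) : Decidable (Spec_find_least_prominent stats out) := by unfold Spec_find_least_prominent; infer_instance

-- ===== CLAIM (what is proved, stated in full; the proofs are below) =====
def Claim_equal_find_least_prominent : Prop := ∀ (stats : List (String × Int)), Dom_find_least_prominent stats → Spec_find_least_prominent stats (find_least_prominent stats)

-- ===== LEMMAS AND PROOFS =====

-- The core fact, about an arbitrary item list l (instantiated with removed_zeros.items = d2.items).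
theorem core_eq (l : List (String × Int)) :
    l.foldl (fun (out : List String) kv =>
      if (PySem.List.min? l (fun x => x.2)).map (fun p => p.2) = some kv.2
      then out ++ [kv.1] else out) [] =
    (match PySem.List.min? (l.foldl (fun (b : PySem.Dict Int (List String)) kv =>
        b.modify kv.2 [] (fun ks => ks ++ [kv.1])) PySem.Dict.empty).keys (fun x => x) with
     | none => []
     | some least => (l.foldl (fun (b : PySem.Dict Int (List String)) kv =>
        b.modify kv.2 [] (fun ks => ks ++ [kv.1])) PySem.Dict.empty).getD least []) := by
  -- keys of the bucket fold = set of values of l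
  have hkeys : (l.foldl (fun (b : PySem.Dict Int (List String)) kv =>
      b.modify kv.2 [] (fun ks => ks ++ [kv.1])) PySem.Dict.empty).keys
      = PySem.Set.ofList (l.map (fun kv => kv.2)) := by
    have := PySem.Dict.keys_foldl_modify_key (l := l) (key := fun kv => kv.2)
      (d0 := ([] : List String)) (f := fun _ kv => (fun ks => ks ++ [kv.1]))
      (d := PySem.Dict.empty)
    simpa [PySem.Dict.keys_empty, PySem.Set.update, PySem.Set.ofList] using this
  rw [hkeys]
  by_cases hne : l = []
  · subst hne; rfl
  -- min over l itself
  obtain ⟨q, hq⟩ : ∃ q, PySem.List.min? l (fun x => x.2) = some q := by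
    cases h : PySem.List.min? l (fun x => x.2) with
    | none => exact absurd ((PySem.List.min?_eq_none_iff _ _).mp h) hne
    | some q => exact ⟨q, rfl⟩
  obtain ⟨m, hm⟩ : ∃ m, PySem.List.min? (PySem.Set.ofList (l.map (fun kv => kv.2))) (fun x => x) = some m := by
    cases h : PySem.List.min? (PySem.Set.ofList (l.map (fun kv => kv.2))) (fun x => x) with
    | none =>
        have := (PySem.List.min?_eq_none_iff _ _).mp h
        have : l.map (fun kv => kv.2) = [] := by
          by_contra hc
          rcases List.exists_mem_of_ne_nil _ hc with ⟨x, hx⟩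
          have : x ∈ PySem.Set.ofList (l.map (fun kv => kv.2)) := (PySem.Set.mem_ofList _ _).mpr hx
          simp_all
        simp_all
    | some m => exact ⟨m, rfl⟩
  have hqm : q.2 = m := by
    have hqmem := PySem.List.min?_mem hq
    have hqmin := PySem.List.min?_isMin hq
    have hmmem := PySem.List.min?_mem hm
    have hmmin := PySem.List.min?_isMin hm
    have h1 : m ≤ q.2 := hmmin _ ((PySem.Set.mem_ofList _ _).mpr (List.mem_map_of_mem hqmem))
    have h2 : q.2 ≤ m := by
      rcases List.mem_map.mp ((PySem.Set.mem_ofList _ _).mp hmmem) with ⟨r, hr, hrm⟩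
      exact hrm ▸ hqmin r hr
    omega
  rw [hm]
  -- LHS
  simp only [PySem.List.foldl_append_ite]
  -- RHS: getD of the bucket fold
  have hbucket : (l.foldl (fun (b : PySem.Dict Int (List String)) kv =>
      b.modify kv.2 [] (fun ks => ks ++ [kv.1])) PySem.Dict.empty).getD m []
      = (l.filter (fun kv => kv.2 == m)).map (fun kv => kv.1) := by
    have hswap : l.foldl (fun (b : PySem.Dict Int (List String)) kv =>
        b.modify kv.2 [] (fun ks => ks ++ [kv.1])) PySem.Dict.empty
        = (l.map Prod.swap).foldl (fun (b : PySem.Dict Int (List String)) p =>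
          b.modify p.1 [] (fun ks => ks ++ [p.2])) PySem.Dict.empty := by
      rw [List.foldl_map]; rfl
    rw [hswap, PySem.Dict.getD_foldl_modify_append]
    simp [List.filter_map, Function.comp_def]
  rw [hbucket, hq]
  simp only [Option.map_some]
  have hfc : ∀ kv ∈ l, (decide (some q.2 = some kv.2)) = ((fun kv => kv.2 == m) kv) := by
    intro kv _
    by_cases h : kv.2 = m
    · simp [h, hqm]
    · simp [h, hqm, show ¬ m = kv.2 from fun hh => h hh.symm]
  have hfe : List.filter (fun x => decide (some q.2 = some x.2)) l
      = List.filter (fun kv => kv.2 == m) l := List.filter_congr hfc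
  simpa using congrArg (List.map Prod.fst) hfe

-- ===== VERDICT (by name: the statement is the Claim_ definition above) =====
theorem find_least_prominent_spec : Claim_equal_find_least_prominent := by
  intro stats _
  unfold Spec_find_least_prominent find_least_prominent find_least_prominent_alt
  exact core_eq _
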